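-- pv_equiv track=rewrite | github.com/Lacamm/Etudes | IUT/1A/Python/P2-SDD/TP2/TP2.py | tousMultiplesDe2
-- ===== SOURCE A (Python) =====
-- def passeModulo(listeEntiers, n):
--     for i in range(len(listeEntiers)):
--         listeEntiers[i] = listeEntiers[i] % n
--
-- def tousMultiplesDe2(listeEntiers, n):
--     ok = True
--     liste=listeEntiers.copy()
--     passeModulo(liste,n)
--     for valeur in liste:
--         if (valeur != 0):
--             ok = False
--     return ok
-- ===== SOURCE B (Python) =====
-- def tousMultiplesDe2(listeEntiers, n):
--     return all(x % n == 0 for x in listeEntiers)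
-- ===== Notes on version B (the rewrite author's own statement) =====
-- stated objective: faster
-- what changed: Replaces the copy + in-place modulo pass + separate non-short-circuiting accumulator scan with a single short-circuiting all() generator pass; no copy, no mutation, no accumulator.
import Mathlib
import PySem

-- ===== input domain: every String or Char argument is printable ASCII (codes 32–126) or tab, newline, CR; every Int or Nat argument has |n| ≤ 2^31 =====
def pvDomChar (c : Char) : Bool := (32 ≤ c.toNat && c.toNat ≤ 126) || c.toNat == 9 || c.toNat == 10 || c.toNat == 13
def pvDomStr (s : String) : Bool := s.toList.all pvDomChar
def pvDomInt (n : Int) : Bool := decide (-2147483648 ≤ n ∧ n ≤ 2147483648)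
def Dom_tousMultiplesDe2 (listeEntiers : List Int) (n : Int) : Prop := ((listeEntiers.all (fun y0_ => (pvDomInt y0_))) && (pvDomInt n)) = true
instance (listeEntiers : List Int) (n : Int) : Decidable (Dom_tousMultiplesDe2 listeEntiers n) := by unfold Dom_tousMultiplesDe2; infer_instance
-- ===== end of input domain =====

-- B replaces A's copy + in-place modulo pass + separate accumulator scan with one short-circuiting all() pass.
-- ===== PORT A =====
-- passeModulo mutates its (copied) list in place; ported as a map producing the same list
def passeModulo (listeEntiers : List Int) (n : Int) : List Int :=
  listeEntiers.map (fun x => PySem.Int.mod x n)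

def tousMultiplesDe2 (listeEntiers : List Int) (n : Int) : Bool :=
  let liste := passeModulo listeEntiers n
  liste.foldl (fun ok valeur => if valeur ≠ 0 then false else ok) true

-- ===== PORT B =====
def tousMultiplesDe2_alt (listeEntiers : List Int) (n : Int) : Bool :=
  listeEntiers.all (fun x => PySem.Int.mod x n == 0)

-- ===== PRECONDITION & SPEC =====
-- Pre_ excludes exactly the inputs where the Python A raises ZeroDivisionError (n = 0 with a nonempty list); B raises there too.
def Pre_tousMultiplesDe2 (listeEntiers : List Int) (n : Int) : Prop := n ≠ 0 ∨ listeEntiers = []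
instance (listeEntiers : List Int) (n : Int) : Decidable (Pre_tousMultiplesDe2 listeEntiers n) := by unfold Pre_tousMultiplesDe2; infer_instance
def pvWitness_tousMultiplesDe2 : List Int × Int := ([2, 4, 7], 2)

def Spec_tousMultiplesDe2 (listeEntiers : List Int) (n : Int) (out : Bool) : Prop := out = tousMultiplesDe2_alt listeEntiers n
instance (listeEntiers : List Int) (n : Int) (out : Bool) : Decidable (Spec_tousMultiplesDe2 listeEntiers n out) := by unfold Spec_tousMultiplesDe2; infer_instance

-- ===== CLAIM (what is proved, stated in full; the proofs are below) =====
def Claim_equal_tousMultiplesDe2 : Prop := ∀ (listeEntiers : List Int) (n : Int), Dom_tousMultiplesDe2 listeEntiers n → Pre_tousMultiplesDe2 listeEntiers n → Spec_tousMultiplesDe2 listeEntiers n (tousMultiplesDe2 listeEntiers n)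

-- ===== LEMMAS AND PROOFS =====
-- A's fold over the residues equals B's all, for any accumulator value obtained as `b && all of earlier elements`;
-- stated generally over the accumulator so induction goes through.
theorem fold_eq_all (l : List Int) (n : Int) (b : Bool) :
    (l.map (fun x => PySem.Int.mod x n)).foldl (fun ok valeur => if valeur ≠ 0 then false else ok) b
      = (b && l.all (fun x => PySem.Int.mod x n == 0)) := by
  induction l generalizing b with
  | nil => simp
  | cons x xs ih =>
    simp only [List.map_cons, List.foldl_cons, List.all_cons, ih]
    by_cases h : PySem.Int.mod x n = 0 <;> simp [h]

-- ===== VERDICT (by name: the statement is the Claim_ definition above) =====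
theorem tousMultiplesDe2_spec : Claim_equal_tousMultiplesDe2 := by
  intro l n _ _
  unfold Spec_tousMultiplesDe2 tousMultiplesDe2 tousMultiplesDe2_alt passeModulo
  rw [fold_eq_all]
  simp
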